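-- pv_equiv track=rewrite | github.com/nemethbalaazs/SOE_Prog1_PY | 2026/minta-zh/feladat1.py | cikkelemzes
-- ===== SOURCE A (Python) =====
-- def cikkelemzes(sorok):
--     adatok={}
--     for sor in sorok:
--         if ';' in sor:
--             user, slug = sor.strip().split(';')
--             if user not in adatok:
--                 adatok[user] = set()
--             adatok[user].add(slug)
--         else:
--             break
--
--     u1,u2 = sorok[-1].strip().split()
--     cikkek1 = adatok.get(u1, set())
--     cikkek2 = adatok.get(u2, set())
--     c = cikkek1 & cikkek2
--     union = cikkek1 | cikkek2
--     return len(cikkek1), len(cikkek2), len(c), len(union)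
-- ===== SOURCE B (Python) =====
-- def cikkelemzes(sorok):
--     u1, u2 = sorok[-1].strip().split()
--     parok = []
--     for sor in sorok:
--         if ';' not in sor:
--             break
--         user, slug = sor.strip().split(';')
--         if (user, slug) not in parok:
--             parok.append((user, slug))
--     n1 = sum(1 for u, _ in parok if u == u1)
--     n2 = sum(1 for u, _ in parok if u == u2)
--     c = sum(1 for u, s in parok if u == u1 and (u2, s) in parok)
--     return n1, n2, c, n1 + n2 - c
-- ===== Notes on version B (the rewrite author's own statement) =====
-- stated objective: alternative
-- what changed: B replaces A's dict of per-user slug-sets and set algebra by a single deduplicated list of (user,slug) pairs; all four numbers are obtained by counting filters over that pair relation (the intersection as pairs (u1,s) whose mirror (u2,s) is also present) and the union size arithmetically as n1+n2-c.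
import Mathlib
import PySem

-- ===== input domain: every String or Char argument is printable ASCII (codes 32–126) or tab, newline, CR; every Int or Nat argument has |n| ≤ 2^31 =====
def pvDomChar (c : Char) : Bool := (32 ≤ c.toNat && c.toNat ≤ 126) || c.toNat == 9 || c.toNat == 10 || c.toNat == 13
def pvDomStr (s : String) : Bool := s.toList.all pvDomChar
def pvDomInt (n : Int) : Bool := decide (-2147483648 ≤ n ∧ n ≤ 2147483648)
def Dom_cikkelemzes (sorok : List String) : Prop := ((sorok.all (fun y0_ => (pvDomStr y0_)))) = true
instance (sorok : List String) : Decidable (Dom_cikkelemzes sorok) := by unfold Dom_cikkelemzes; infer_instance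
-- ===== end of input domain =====

-- B drops A's dict of per-user slug-sets entirely: it keeps one deduplicated list of
-- (user,slug) pairs and derives all four numbers by counting filters over that relation
-- (union size arithmetically as n1+n2-c); same behaviour on Pre_, alternative algorithm.

-- ===== PORT A =====
-- the for-loop over sorok: builds the dict of per-user slug sets; none = ValueError
-- from 'user, slug = sor.strip().split(';')' not yielding exactly two parts
def cikkelemzesLoop : List String → PySem.Dict String (PySem.Set String) →
    Option (PySem.Dict String (PySem.Set String))
  | [], adatok => some adatok
  | sor :: rest, adatok =>
    if PySem.Str.isIn ";" sor then
      match PySem.Str.split? (PySem.Str.strip sor) ";" with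
      | some [user, slug] =>
        cikkelemzesLoop rest
          ((if adatok.contains user then adatok
            else adatok.insert user PySem.Set.empty).modify user PySem.Set.empty
            (fun s => PySem.Set.add s slug))
      | _ => none
    else some adatok

def cikkelemzes (sorok : List String) : Int × Int × Int × Int :=
  match cikkelemzesLoop sorok PySem.Dict.empty with
  | none => (0, 0, 0, 0)  -- ValueError in the loop: excluded by Pre_
  | some adatok =>
    match PySem.List.pyGet? sorok (-1) with
    | none => (0, 0, 0, 0)  -- IndexError on empty sorok: excluded by Pre_
    | some last =>
      match PySem.Str.split₀ (PySem.Str.strip last) with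
      | [u1, u2] =>
        let cikkek1 := adatok.getD u1 PySem.Set.empty
        let cikkek2 := adatok.getD u2 PySem.Set.empty
        let c := PySem.Set.inter cikkek1 cikkek2
        let un := PySem.Set.union cikkek1 cikkek2
        ((PySem.Set.len cikkek1 : Int), (PySem.Set.len cikkek2 : Int),
         (PySem.Set.len c : Int), (PySem.Set.len un : Int))
      | _ => (0, 0, 0, 0)  -- ValueError unpacking u1,u2: excluded by Pre_

-- ===== PORT B =====
-- B's loop: collects the deduplicated (user,slug) pairs ('if (user,slug) not in parok: append')
def cikkelemzesAltLoop : List String → PySem.Set (String × String) →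
    Option (PySem.Set (String × String))
  | [], parok => some parok
  | sor :: rest, parok =>
    if PySem.Str.isIn ";" sor then
      match PySem.Str.split? (PySem.Str.strip sor) ";" with
      | some [user, slug] => cikkelemzesAltLoop rest (PySem.Set.add parok (user, slug))
      | _ => none
    else some parok

def cikkelemzes_alt (sorok : List String) : Int × Int × Int × Int :=
  match PySem.List.pyGet? sorok (-1) with
  | none => (0, 0, 0, 0)  -- IndexError on empty sorok: excluded by Pre_
  | some last =>
    match PySem.Str.split₀ (PySem.Str.strip last) with
    | [u1, u2] =>
      match cikkelemzesAltLoop sorok PySem.Set.empty with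
      | none => (0, 0, 0, 0)  -- ValueError in the loop: excluded by Pre_
      | some parok =>
        let n1 : Int := parok.countP (fun p => p.1 == u1)
        let n2 : Int := parok.countP (fun p => p.1 == u2)
        let c : Int := parok.countP (fun p => p.1 == u1 && parok.contains (u2, p.2))
        (n1, n2, c, n1 + n2 - c)
    | _ => (0, 0, 0, 0)  -- ValueError unpacking u1,u2: excluded by Pre_

-- ===== PRECONDITION & SPEC =====
-- Pre_ excludes exactly the inputs where A raises: empty sorok (IndexError on sorok[-1]),
-- a parsed line whose stripped form does not split on ';' into exactly two parts
-- (ValueError), and a last line not splitting into exactly two whitespace tokens (ValueError).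
def Pre_cikkelemzes (sorok : List String) : Prop :=
  sorok ≠ [] ∧
  (∀ sor ∈ sorok.takeWhile (fun s => PySem.Str.isIn ";" s),
     ((PySem.Str.split? (PySem.Str.strip sor) ";").getD []).length = 2) ∧
  (PySem.Str.split₀ (PySem.Str.strip (sorok.getLastD ""))).length = 2
instance (sorok : List String) : Decidable (Pre_cikkelemzes sorok) := by
  unfold Pre_cikkelemzes; infer_instance

def pvWitness_cikkelemzes : List String :=
  ["anna;cats", "bela;dogs", "anna;dogs", "anna bela"]

def Spec_cikkelemzes (sorok : List String) (out : Int × Int × Int × Int) : Prop := out = cikkelemzes_alt sorok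
instance (sorok : List String) (out : Int × Int × Int × Int) : Decidable (Spec_cikkelemzes sorok out) := by unfold Spec_cikkelemzes; infer_instance

-- ===== CLAIM (what is proved, stated in full; the proofs are below) =====
def Claim_equal_cikkelemzes : Prop := ∀ (sorok : List String), Dom_cikkelemzes sorok → Pre_cikkelemzes sorok → Spec_cikkelemzes sorok (cikkelemzes sorok)

-- ===== LEMMAS AND PROOFS =====

-- one A-loop step changes each user's set exactly by adding slug when user matches
lemma step_getD (d : PySem.Dict String (PySem.Set String)) (user slug u : String) :
    (((if d.contains user then d else d.insert user PySem.Set.empty).modify user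
        PySem.Set.empty (fun s => PySem.Set.add s slug)).getD u PySem.Set.empty)
      = if user == u then PySem.Set.add (d.getD u PySem.Set.empty) slug
        else d.getD u PySem.Set.empty := by
  rw [PySem.Dict.getD_modify]
  by_cases hu : u = user
  · subst hu
    rw [if_pos rfl, beq_self_eq_true, if_pos rfl]
    by_cases hc : d.contains u
    · rw [if_pos hc]
    · rw [if_neg hc, PySem.Dict.getD_insert, if_pos rfl,
        PySem.Dict.getD_of_not_contains d _ (Bool.eq_false_iff.mpr hc)]
  · have hne : (user == u) = false := beq_eq_false_iff_ne.mpr (Ne.symm hu)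
    rw [if_neg hu, hne]
    simp only [Bool.false_eq_true, if_false]
    by_cases hc : d.contains user
    · rw [if_pos hc]
    · rw [if_neg hc, PySem.Dict.getD_insert, if_neg hu]

-- the two loops run in lockstep: A's dict, read per user, is B's pair relation sliced by user
lemma loop_rel :
    ∀ (sorok : List String) (d : PySem.Dict String (PySem.Set String))
      (P : PySem.Set (String × String)),
    (∀ sor ∈ sorok.takeWhile (fun s => PySem.Str.isIn ";" s),
       ((PySem.Str.split? (PySem.Str.strip sor) ";").getD []).length = 2) →
    (∀ u s, s ∈ d.getD u PySem.Set.empty ↔ (u, s) ∈ P) →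
    (∀ u, (d.getD u PySem.Set.empty).Nodup) → P.Nodup →
    ∃ d' P', cikkelemzesLoop sorok d = some d' ∧
      cikkelemzesAltLoop sorok P = some P' ∧
      (∀ u s, s ∈ d'.getD u PySem.Set.empty ↔ (u, s) ∈ P') ∧
      (∀ u, (d'.getD u PySem.Set.empty).Nodup) ∧ P'.Nodup := by
  intro sorok
  induction sorok with
  | nil => intro d P _ h1 h2 h3; exact ⟨d, P, rfl, rfl, h1, h2, h3⟩
  | cons sor rest ih =>
    intro d P hpre hmem hnd hP
    have htw : (sor :: rest).takeWhile (fun s => PySem.Str.isIn ";" s)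
        = if PySem.Str.isIn ";" sor then
            sor :: rest.takeWhile (fun s => PySem.Str.isIn ";" s) else [] :=
      List.takeWhile_cons
    by_cases hin : PySem.Str.isIn ";" sor
    · rw [hin, if_pos rfl] at htw
      have hlen : ((PySem.Str.split? (PySem.Str.strip sor) ";").getD []).length = 2 := by
        apply hpre; rw [htw]; exact List.mem_cons_self
      have hpre' : ∀ s ∈ rest.takeWhile (fun s => PySem.Str.isIn ";" s),
          ((PySem.Str.split? (PySem.Str.strip s) ";").getD []).length = 2 := by
        intro s hs; apply hpre; rw [htw]; exact List.mem_cons_of_mem _ hs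
      rcases hsp : PySem.Str.split? (PySem.Str.strip sor) ";" with _ | parts
      · rw [hsp] at hlen; exact absurd hlen (by simp)
      · rw [hsp] at hlen
        match parts, hlen with
        | [user, slug], _ =>
          have hmem' : ∀ u s,
              s ∈ (((if d.contains user then d else d.insert user PySem.Set.empty).modify
                user PySem.Set.empty (fun s => PySem.Set.add s slug)).getD u PySem.Set.empty)
                ↔ (u, s) ∈ PySem.Set.add P (user, slug) := by
            intro u s
            rw [step_getD, PySem.Set.mem_add]
            by_cases hu : user = u
            · subst hu
              rw [beq_self_eq_true, if_pos rfl, PySem.Set.mem_add, hmem]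
              constructor
              · rintro (h | h); · exact Or.inl h
                · exact Or.inr (by rw [h])
              · rintro (h | h); · exact Or.inl h
                · exact Or.inr (congrArg Prod.snd h)
            · rw [if_neg (by simp [beq_eq_false_iff_ne.mpr hu]), hmem]
              constructor
              · exact Or.inl
              · rintro (h | h); · exact h
                · exact absurd (congrArg Prod.fst h).symm hu
          have hnd' : ∀ u,
              ((((if d.contains user then d else d.insert user PySem.Set.empty).modify
                user PySem.Set.empty (fun s => PySem.Set.add s slug)).getD u
                PySem.Set.empty)).Nodup := by
            intro u
            rw [step_getD]
            split
            · exact PySem.Set.nodup_add _ _ (hnd u)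
            · exact hnd u
          obtain ⟨d', P', h1, h2, h3, h4, h5⟩ := ih _ (PySem.Set.add P (user, slug))
            hpre' hmem' hnd' (PySem.Set.nodup_add _ _ hP)
          refine ⟨d', P', ?_, ?_, h3, h4, h5⟩
          · show (if PySem.Str.isIn ";" sor then _ else _) = _
            rw [hin, if_pos rfl, hsp]; exact h1
          · show (if PySem.Str.isIn ";" sor then _ else _) = _
            rw [hin, if_pos rfl, hsp]; exact h2
    · have hfa : PySem.Str.isIn ";" sor = false := Bool.eq_false_iff.mpr hin
      refine ⟨d, P, ?_, ?_, hmem, hnd, hP⟩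
      · show (if PySem.Str.isIn ";" sor then _ else _) = _
        rw [hfa]; simp only [Bool.false_eq_true, if_false]
      · show (if PySem.Str.isIn ";" sor then _ else _) = _
        rw [hfa]; simp only [Bool.false_eq_true, if_false]

-- two nodup lists with the same members have the same length
lemma len_eq_of_mem_iff {α : Type} [DecidableEq α] (L M : List α)
    (hL : L.Nodup) (hM : M.Nodup) (h : ∀ x, x ∈ L ↔ x ∈ M) : L.length = M.length := by
  rw [← List.toFinset_card_of_nodup hL, ← List.toFinset_card_of_nodup hM]
  congr 1; ext x; simp [h]

-- counting pairs of P with first component u (and an extra test) = size of the slug set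
lemma countP_eq_len (P : List (String × String)) (hP : P.Nodup)
    (q : String × String → Bool) (u : String)
    (hu : ∀ p ∈ P, q p = true → p.1 = u)
    (L : List String) (hL : L.Nodup)
    (hmem : ∀ s, s ∈ L ↔ (u, s) ∈ P ∧ q (u, s) = true) :
    P.countP q = L.length := by
  rw [List.countP_eq_length_filter]
  have hF : (P.filter q).Nodup := hP.filter q
  have hMnd : ((P.filter q).map Prod.snd).Nodup := by
    refine hF.map_on ?_
    intro p hp p' hp' hsnd
    have h1 := hu p (List.mem_of_mem_filter hp) (List.of_mem_filter hp)
    have h2 := hu p' (List.mem_of_mem_filter hp') (List.of_mem_filter hp')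
    exact Prod.ext (h1.trans h2.symm) hsnd
  rw [← List.length_map (f := Prod.snd)]
  refine len_eq_of_mem_iff _ _ hMnd hL ?_
  intro s
  rw [hmem, List.mem_map]
  constructor
  · rintro ⟨p, hp, rfl⟩
    have hq := List.of_mem_filter hp
    have hpP := List.mem_of_mem_filter hp
    have h1 := hu p hpP hq
    have : p = (u, p.2) := Prod.ext h1 rfl
    rw [← this]; exact ⟨hpP, hq⟩
  · rintro ⟨hp, hq⟩
    exact ⟨(u, s), List.mem_filter.mpr ⟨hp, hq⟩, rfl⟩

-- inclusion–exclusion for PySem sets: |s ∪ t| = |s| + |t| − |s ∩ t|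
lemma len_union_inter (s t : PySem.Set String) (hs : s.Nodup) (ht : t.Nodup) :
    (PySem.Set.len (PySem.Set.union s t) : Int)
      = (PySem.Set.len s : Int) + PySem.Set.len t
          - PySem.Set.len (PySem.Set.inter s t) := by
  have hU : (PySem.Set.union s t).Nodup := PySem.Set.nodup_union s t hs
  have hI : (PySem.Set.inter s t).Nodup := PySem.Set.nodup_inter s t hs
  have cardU : (PySem.Set.union s t).toFinset = s.toFinset ∪ t.toFinset := by
    ext x; simp [PySem.Set.mem_union]
  have cardI : (PySem.Set.inter s t).toFinset = s.toFinset ∩ t.toFinset := by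
    ext x; simp [PySem.Set.mem_inter]
  have lU : (PySem.Set.union s t).length = (s.toFinset ∪ t.toFinset).card := by
    rw [← cardU, List.toFinset_card_of_nodup hU]
  have lI : (PySem.Set.inter s t).length = (s.toFinset ∩ t.toFinset).card := by
    rw [← cardI, List.toFinset_card_of_nodup hI]
  have ls : s.length = s.toFinset.card := (List.toFinset_card_of_nodup hs).symm
  have lt : t.length = t.toFinset.card := (List.toFinset_card_of_nodup ht).symm
  have h := Finset.card_union_add_card_inter s.toFinset t.toFinset
  simp only [PySem.Set.len, lU, lI, ls, lt]
  omega

-- ===== VERDICT (by name: the statement is the Claim_ definition above) =====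
theorem cikkelemzes_spec : Claim_equal_cikkelemzes := by
  intro sorok _ hpre
  obtain ⟨hne, hlines, hlast⟩ := hpre
  unfold Spec_cikkelemzes cikkelemzes cikkelemzes_alt
  have hget : PySem.List.pyGet? sorok (-1) = some (sorok.getLastD "") := by
    rw [PySem.List.pyGet?_neg_one]
    rcases hx : sorok.getLast? with _ | x
    · exact absurd (List.getLast?_eq_none_iff.mp hx) hne
    · rw [List.getLastD_eq_getLast?, hx]; rfl
  rcases hsp : PySem.Str.split₀ (PySem.Str.strip (sorok.getLastD "")) with _ | ⟨u1, _ | ⟨u2, _ | _⟩⟩ <;>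
    rw [hsp] at hlast <;> simp at hlast
  have hinitmem : ∀ u s, s ∈ (PySem.Dict.empty.getD u (PySem.Set.empty : PySem.Set String))
      ↔ (u, s) ∈ (PySem.Set.empty : PySem.Set (String × String)) := by
    intro u s
    rw [PySem.Dict.getD_of_not_contains _ _ rfl]
    simp [PySem.Set.empty]
  obtain ⟨d', P', hA, hB, hmem, hnd, hP⟩ := loop_rel sorok PySem.Dict.empty PySem.Set.empty
    hlines hinitmem (fun u => by rw [PySem.Dict.getD_of_not_contains _ _ rfl]; exact List.nodup_nil)
    List.nodup_nil
  simp only [hA, hget, hsp, hB]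
  set c1 := d'.getD u1 PySem.Set.empty with hc1
  set c2 := d'.getD u2 PySem.Set.empty with hc2
  have h1 : P'.countP (fun p => p.1 == u1) = c1.length := by
    refine countP_eq_len P' hP _ u1 (fun p _ h => by simpa using h) c1 (hnd u1) ?_
    intro s; rw [hc1, hmem]; simp
  have h2 : P'.countP (fun p => p.1 == u2) = c2.length := by
    refine countP_eq_len P' hP _ u2 (fun p _ h => by simpa using h) c2 (hnd u2) ?_
    intro s; rw [hc2, hmem]; simp
  have h3 : P'.countP (fun p => p.1 == u1 && P'.contains (u2, p.2))
      = (PySem.Set.inter c1 c2).length := by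
    refine countP_eq_len P' hP _ u1 ?_ _ (PySem.Set.nodup_inter _ _ (hnd u1)) ?_
    · intro p _ h; simpa using ((Bool.and_eq_true _ _).mp h).1
    · intro s
      rw [PySem.Set.mem_inter, hc1, hc2, hmem, hmem]
      simp
  have h4 := len_union_inter c1 c2 (hnd u1) (hnd u2)
  simp only [PySem.Set.len] at h4 ⊢
  rw [h1, h2, h3, h4]
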